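-- pv_equiv track=rewrite | github.com/mcgillij/aoc2025 | day9/day9.py | largest_rectangle_area_red_green_set
-- ===== SOURCE A (Python) =====
-- def largest_rectangle_area_red_green_set(red_tiles, all_green):
--     max_area = 0
--     red_list = list(red_tiles)
--     for i in range(len(red_list)):
--         x1, y1 = red_list[i]
--         for j in range(i + 1, len(red_list)):
--             x2, y2 = red_list[j]
--             if x1 == x2 or y1 == y2:
--                 continue
--             min_rx, max_rx = min(x1, x2), max(x1, x2)
--             min_ry, max_ry = min(y1, y2), max(y1, y2)
--             area = (max_rx - min_rx + 1) * (max_ry - min_ry + 1)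
--             if area <= max_area:
--                 continue
--             # Check perimeter first
--             valid = True
--             for x in range(min_rx, max_rx + 1):
--                 if (x, min_ry) not in all_green or (x, max_ry) not in all_green:
--                     valid = False
--                     break
--             if not valid:
--                 continue
--             for y in range(min_ry, max_ry + 1):
--                 if (min_rx, y) not in all_green or (max_rx, y) not in all_green:
--                     valid = False
--                     break
--             if not valid:
--                 continue
--             # Check interior only if perimeter is valid
--             for x in range(min_rx + 1, max_rx):
--                 for y in range(min_ry + 1, max_ry):
--                     if (x, y) not in all_green:
--                         valid = False
--                         break
--                 if not valid:
--                     break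
--             if valid:
--                 max_area = area
--     return max_area
-- ===== SOURCE B (Python) =====
-- def largest_rectangle_area_red_green_set(red_tiles, all_green):
--     green = set(all_green)
--     xs = sorted({x for x, _ in green})
--     ys = sorted({y for _, y in green})
--     xi = {x: i for i, x in enumerate(xs)}
--     yi = {y: i for i, y in enumerate(ys)}
--     nx, ny = len(xs), len(ys)
--     # count of (distinct) green cells at each compressed coordinate pair
--     cnt = {}
--     for x, y in green:
--         k = (xi[x], yi[y])
--         cnt[k] = cnt.get(k, 0) + 1
--     # 2D prefix sums: P[i][j] = number of green cells with x-rank < i and y-rank < j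
--     P = [[0] * (ny + 1)]
--     for i in range(nx):
--         prev = P[i]
--         row = [0]
--         acc = 0
--         for j in range(ny):
--             acc += cnt.get((i, j), 0)
--             row.append(prev[j + 1] + acc)
--         P.append(row)
--     best = 0
--     red = list(red_tiles)
--     for idx, (x1, y1) in enumerate(red):
--         for x2, y2 in red[idx + 1:]:
--             if x1 == x2 or y1 == y2:
--                 continue
--             area = (abs(x1 - x2) + 1) * (abs(y1 - y2) + 1)
--             if area <= best:
--                 continue
--             # a corner column/row with no green cell at all: rectangle cannot be green
--             if x1 not in xi or x2 not in xi or y1 not in yi or y2 not in yi: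
--                 continue
--             a, b = xi[min(x1, x2)], xi[max(x1, x2)] + 1
--             c, d = yi[min(y1, y2)], yi[max(y1, y2)] + 1
--             # rectangle is fully green iff it contains as many green cells as its area
--             if P[b][d] - P[a][d] - P[b][c] + P[a][c] == area:
--                 best = area
--     return best
-- ===== Notes on version B (the rewrite author's own statement) =====
-- stated objective: faster
-- what changed: B replaces A's per-pair cell-by-cell perimeter/interior scans over the rectangle (each cell a linear lookup in the green list) by coordinate compression and a 2D prefix-sum grid of the distinct green cells, deciding 'rectangle fully green' with four O(1) grid lookups via count == area.
import Mathlib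
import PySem

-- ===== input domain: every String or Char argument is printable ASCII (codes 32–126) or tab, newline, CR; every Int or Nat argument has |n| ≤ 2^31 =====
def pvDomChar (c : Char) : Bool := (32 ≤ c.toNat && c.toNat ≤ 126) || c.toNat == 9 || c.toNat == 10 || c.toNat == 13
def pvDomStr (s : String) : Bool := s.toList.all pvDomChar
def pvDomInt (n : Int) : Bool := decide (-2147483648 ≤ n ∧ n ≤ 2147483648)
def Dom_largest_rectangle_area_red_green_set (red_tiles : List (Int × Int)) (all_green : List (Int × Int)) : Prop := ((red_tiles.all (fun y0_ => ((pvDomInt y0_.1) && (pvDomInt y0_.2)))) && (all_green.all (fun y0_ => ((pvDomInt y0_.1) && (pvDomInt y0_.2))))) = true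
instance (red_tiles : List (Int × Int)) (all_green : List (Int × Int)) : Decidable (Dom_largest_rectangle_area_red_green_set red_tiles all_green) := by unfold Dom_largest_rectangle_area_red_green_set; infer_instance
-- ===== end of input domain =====

-- B replaces A's per-pair cell-by-cell membership scans by coordinate compression plus a
-- 2D prefix-sum grid of the green cells: a candidate rectangle is fully green iff the
-- number of green cells inside it (four prefix lookups) equals its area (objective: faster).

-- ===== PORT A =====
-- lazy bounded scan: 'for v in range(a, b): if not f(v): break' — stops at the first failure
def pvAllFrom : Nat → Int → (Int → Bool) → Bool
  | 0, _, _ => true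
  | n + 1, x, f => f x && pvAllFrom n (x + 1) f
def pvRangeAll (a b : Int) (f : Int → Bool) : Bool := pvAllFrom (b - a).toNat a f

-- perimeter row check: for x in range(min_rx, max_rx+1): (x,min_ry) and (x,max_ry) green
def pvA_perimX (g : List (Int × Int)) (minx maxx miny maxy : Int) : Bool :=
  pvRangeAll minx (maxx + 1) (fun x => g.contains (x, miny) && g.contains (x, maxy))
-- perimeter column check
def pvA_perimY (g : List (Int × Int)) (minx maxx miny maxy : Int) : Bool :=
  pvRangeAll miny (maxy + 1) (fun y => g.contains (minx, y) && g.contains (maxx, y))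
-- interior check
def pvA_interior (g : List (Int × Int)) (minx maxx miny maxy : Int) : Bool :=
  pvRangeAll (minx + 1) maxx (fun x =>
    pvRangeAll (miny + 1) maxy (fun y => g.contains (x, y)))
-- the body of the inner j-loop (the breaks compute exactly the && of the three all-checks)
def pvA_step (g : List (Int × Int)) (p q : Int × Int) (m : Int) : Int :=
  if p.1 == q.1 || p.2 == q.2 then m
  else
    let minx := min p.1 q.1
    let maxx := max p.1 q.1
    let miny := min p.2 q.2
    let maxy := max p.2 q.2
    let area := (maxx - minx + 1) * (maxy - miny + 1)
    if area ≤ m then m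
    else if pvA_perimX g minx maxx miny maxy && pvA_perimY g minx maxx miny maxy &&
            pvA_interior g minx maxx miny maxy then area
    else m
-- the i-loop: red_list[i] paired with each later red_list[j]
def pvA_loop (g : List (Int × Int)) : List (Int × Int) → Int → Int
  | [], m => m
  | p :: rest, m => pvA_loop g rest (rest.foldl (fun m q => pvA_step g p q m) m)

def largest_rectangle_area_red_green_set (red_tiles : List (Int × Int)) (all_green : List (Int × Int)) : Int :=
  pvA_loop all_green red_tiles 0

-- ===== PORT B =====
-- xi = {x: i for i, x in enumerate(xs)}
def pvB_mkIdx (l : List Int) : PySem.Dict Int Int :=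
  (PySem.List.enumerate l 0).foldl (fun d p => d.insert p.2 p.1) PySem.Dict.empty

-- cnt[k] = cnt.get(k, 0) + 1 over the rank pair of each green cell
-- (Python's xi[x] on a key provably present is ported as getD _ 0)
def pvB_cnt (green : List (Int × Int)) (xi yi : PySem.Dict Int Int) : PySem.Dict (Int × Int) Int :=
  green.foldl (fun d g =>
    d.insert (xi.getD g.1 0, yi.getD g.2 0) (d.getD (xi.getD g.1 0, yi.getD g.2 0) 0 + 1))
    PySem.Dict.empty

-- inner row loop: acc += cnt.get((i,j),0); row.append(prev[j+1] + acc)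
def pvB_row (cnt : PySem.Dict (Int × Int) Int) (i : Int) (prev : List Int) (ny : Nat) : List Int :=
  ((PySem.List.pyRange 0 (ny : Int) 1).foldl
    (fun s j =>
      (s.1 ++ [PySem.List.pyGetD prev (j + 1) 0 + (s.2 + cnt.getD (i, j) 0)],
       s.2 + cnt.getD (i, j) 0))
    ([(0 : Int)], (0 : Int))).1

-- P = [[0]*(ny+1)]; for i in range(nx): P.append(row built from P[i])
def pvB_grid (cnt : PySem.Dict (Int × Int) Int) (nx ny : Nat) : List (List Int) :=
  (PySem.List.pyRange 0 (nx : Int) 1).foldl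
    (fun P i => P ++ [pvB_row cnt i (PySem.List.pyGetD P i []) ny])
    [List.replicate (ny + 1) (0 : Int)]

-- P[i][j] (indices provably in range wherever the Python subscripts, so Python's P[b][d] is this)
def pvGet2 (P : List (List Int)) (i j : Int) : Int :=
  PySem.List.pyGetD (PySem.List.pyGetD P i []) j 0

-- body of the inner pair loop
def pvB_step (xi yi : PySem.Dict Int Int) (P : List (List Int)) (p q : Int × Int) (m : Int) : Int :=
  if p.1 == q.1 || p.2 == q.2 then m
  else
    let area := (|p.1 - q.1| + 1) * (|p.2 - q.2| + 1)
    if area ≤ m then m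
    else if !(xi.contains p.1) || !(xi.contains q.1) || !(yi.contains p.2) || !(yi.contains q.2) then m
    else
      let a := xi.getD (min p.1 q.1) 0
      let b := xi.getD (max p.1 q.1) 0 + 1
      let c := yi.getD (min p.2 q.2) 0
      let d := yi.getD (max p.2 q.2) 0 + 1
      if pvGet2 P b d - pvGet2 P a d - pvGet2 P b c + pvGet2 P a c == area then area else m

-- for idx,(x1,y1) in enumerate(red): for (x2,y2) in red[idx+1:] …
def pvB_loop (xi yi : PySem.Dict Int Int) (P : List (List Int)) : List (Int × Int) → Int → Int
  | [], m => m
  | p :: rest, m => pvB_loop xi yi P rest (rest.foldl (fun m q => pvB_step xi yi P p q m) m)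

def largest_rectangle_area_red_green_set_alt (red_tiles : List (Int × Int)) (all_green : List (Int × Int)) : Int :=
  let green : PySem.Set (Int × Int) := PySem.Set.ofList all_green
  let xs := PySem.List.sorted (PySem.Set.ofList (green.map (·.1))) (fun x => x) false
  let ys := PySem.List.sorted (PySem.Set.ofList (green.map (·.2))) (fun x => x) false
  let xi := pvB_mkIdx xs
  let yi := pvB_mkIdx ys
  let cnt := pvB_cnt green xi yi
  let P := pvB_grid cnt xs.length ys.length
  pvB_loop xi yi P red_tiles 0

-- ===== PRECONDITION & SPEC =====
def Spec_largest_rectangle_area_red_green_set (red_tiles : List (Int × Int)) (all_green : List (Int × Int)) (out : Int) : Prop := out = largest_rectangle_area_red_green_set_alt red_tiles all_green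
instance (red_tiles : List (Int × Int)) (all_green : List (Int × Int)) (out : Int) : Decidable (Spec_largest_rectangle_area_red_green_set red_tiles all_green out) := by unfold Spec_largest_rectangle_area_red_green_set; infer_instance

-- ===== CLAIM (what is proved, stated in full; the proofs are below) =====
def Claim_equal_largest_rectangle_area_red_green_set : Prop := ∀ (red_tiles : List (Int × Int)) (all_green : List (Int × Int)), Dom_largest_rectangle_area_red_green_set red_tiles all_green → Spec_largest_rectangle_area_red_green_set red_tiles all_green (largest_rectangle_area_red_green_set red_tiles all_green)

-- ===== LEMMAS AND PROOFS =====

-- the rank of x in a list: how many elements are smaller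
def pvRank (l : List Int) (x : Int) : Nat := (l.filter (fun z => decide (z < x))).length

-- the lazy scan computes the conjunction over the whole range
theorem pvAllFrom_eq (f : Int → Bool) (b : Int) (n : Nat) (a : Int) (h : (b - a).toNat = n) :
    pvAllFrom n a f = (PySem.List.pyRange a b 1).all f := by
  induction n generalizing a with
  | zero =>
    rw [PySem.List.pyRange_one_eq_nil (by omega), pvAllFrom]
    rfl
  | succ n ih =>
    rw [PySem.List.pyRange_one_cons (by omega), pvAllFrom, List.all_cons,
      ih (a + 1) (by omega)]

theorem pvRangeAll_eq (a b : Int) (f : Int → Bool) :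
    pvRangeAll a b f = (PySem.List.pyRange a b 1).all f :=
  pvAllFrom_eq f b (b - a).toNat a rfl

-- A's three partial checks together test exactly the full rectangle
theorem pv_valid_iff (g : List (Int × Int)) (x1 y1 x2 y2 : Int) (hx : x1 ≠ x2) (hy : y1 ≠ y2) :
    (pvA_perimX g (min x1 x2) (max x1 x2) (min y1 y2) (max y1 y2) &&
     pvA_perimY g (min x1 x2) (max x1 x2) (min y1 y2) (max y1 y2) &&
     pvA_interior g (min x1 x2) (max x1 x2) (min y1 y2) (max y1 y2)) = true ↔
    (∀ x y, min x1 x2 ≤ x → x ≤ max x1 x2 → min y1 y2 ≤ y → y ≤ max y1 y2 → (x, y) ∈ g) := by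
  simp only [pvA_perimX, pvA_perimY, pvA_interior, pvRangeAll_eq, Bool.and_eq_true,
    List.all_eq_true, PySem.List.mem_pyRange_one, List.contains_iff_mem]
  constructor
  · rintro ⟨⟨hrow, hcol⟩, hint⟩ x y hx1 hx2 hy1 hy2
    by_cases hxm : x = min x1 x2
    · subst hxm; exact (hcol y ⟨hy1, by omega⟩).1
    by_cases hxM : x = max x1 x2
    · subst hxM; exact (hcol y ⟨hy1, by omega⟩).2
    by_cases hym : y = min y1 y2
    · subst hym; exact (hrow x ⟨hx1, by omega⟩).1
    by_cases hyM : y = max y1 y2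
    · subst hyM; exact (hrow x ⟨hx1, by omega⟩).2
    · exact hint x ⟨by omega, by omega⟩ y ⟨by omega, by omega⟩
  · intro h
    have hxlt : min x1 x2 < max x1 x2 := by rcases lt_or_gt_of_ne hx with h' | h' <;> omega
    have hylt : min y1 y2 < max y1 y2 := by rcases lt_or_gt_of_ne hy with h' | h' <;> omega
    refine ⟨⟨fun x hx' => ⟨?_, ?_⟩, fun y hy' => ⟨?_, ?_⟩⟩, fun x hx' y hy' => ?_⟩
    · exact h x (min y1 y2) hx'.1 (by omega) (by omega) (by omega)
    · exact h x (max y1 y2) hx'.1 (by omega) (by omega) (by omega)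
    · exact h (min x1 x2) y (by omega) (by omega) hy'.1 (by omega)
    · exact h (max x1 x2) y (by omega) (by omega) hy'.1 (by omega)
    · exact h x y (by omega) (by omega) (by omega) (by omega)

-- a fold of (key, value) inserts never touches a key outside its key list
theorem pv_get?_idxfold_not_mem (t : List (Int × Int)) (d : PySem.Dict Int Int) (x : Int)
    (hx : x ∉ t.map (·.2)) :
    (t.foldl (fun d p => d.insert p.2 p.1) d).get? x = d.get? x := by
  induction t generalizing d with
  | nil => rfl
  | cons a t ih =>
    simp only [List.map_cons, List.mem_cons, not_or] at hx
    rw [List.foldl_cons, ih _ hx.2, PySem.Dict.get?_insert_of_ne _ _ hx.1]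

-- lookup in the enumerate-fold dict is "start + index in the list"
theorem pv_idxfold_get? (t : List Int) (s : Int) (d : PySem.Dict Int Int) (x : Int)
    (hnd : t.Nodup) :
    ((PySem.List.enumerate t s).foldl (fun d p => d.insert p.2 p.1) d).get? x
      = match PySem.List.index? t x with
        | some k => some (s + k)
        | none => d.get? x := by
  induction t generalizing s d with
  | nil => simp [PySem.List.enumerate_nil, PySem.List.index?_eq_idxOf?]
  | cons a t ih =>
    rw [PySem.List.enumerate_cons, List.foldl_cons]
    rcases List.nodup_cons.mp hnd with ⟨ha, hndt⟩
    by_cases hxa : x = a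
    · subst hxa
      rw [pv_get?_idxfold_not_mem _ _ _ (by rw [PySem.List.map_snd_enumerate]; exact ha),
        PySem.Dict.get?_insert_self]
      rw [PySem.List.index?_cons_self]
      simp
    · rw [ih (s + 1) _ hndt, PySem.List.index?_cons_of_ne t (Ne.symm hxa)]
      cases h : PySem.List.index? t x with
      | none => simp [PySem.Dict.get?_insert_of_ne _ _ hxa]
      | some k =>
        simp only [Option.map_some]
        push_cast
        ring_nf

-- in a strictly increasing list, the index of a member is its rank
theorem pv_index?_eq_rank (l : List Int) (hp : l.Pairwise (· < ·)) (x : Int) (hx : x ∈ l) :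
    PySem.List.index? l x = some (pvRank l x) := by
  induction l with
  | nil => cases hx
  | cons a t ih =>
    rcases List.pairwise_cons.mp hp with ⟨halt, hpt⟩
    by_cases hxa : x = a
    · subst hxa
      rw [PySem.List.index?_cons_self]
      have : pvRank (x :: t) x = 0 := by
        unfold pvRank
        rw [List.filter_cons_of_neg (by simp)]
        rw [List.filter_eq_nil_iff.mpr (fun z hz => by simp [not_lt.mpr (le_of_lt (halt z hz))])]
        rfl
      rw [this]
    · have hxt : x ∈ t := (List.mem_cons.mp hx).resolve_left hxa
      rw [PySem.List.index?_cons_of_ne t (Ne.symm hxa), ih hpt hxt]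
      have : pvRank (a :: t) x = pvRank t x + 1 := by
        unfold pvRank
        rw [List.filter_cons_of_pos (by simp [halt x hxt])]
        simp [Nat.add_comm]
      rw [this]
      rfl

-- the dict built by B: lookup of a member is its rank, contains is membership
theorem pvB_mkIdx_get? (l : List Int) (hp : l.Pairwise (· < ·)) (x : Int) (hx : x ∈ l) :
    (pvB_mkIdx l).get? x = some ((pvRank l x : Nat) : Int) := by
  unfold pvB_mkIdx
  rw [pv_idxfold_get? l 0 _ x hp.nodup, pv_index?_eq_rank l hp x hx]
  simp

theorem pvB_mkIdx_getD (l : List Int) (hp : l.Pairwise (· < ·)) (x : Int) (hx : x ∈ l) :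
    (pvB_mkIdx l).getD x 0 = ((pvRank l x : Nat) : Int) := by
  rw [PySem.Dict.getD_eq_get?_getD, pvB_mkIdx_get? l hp x hx]
  rfl

theorem pvB_mkIdx_contains (l : List Int) (hnd : l.Nodup) (x : Int) :
    (pvB_mkIdx l).contains x = decide (x ∈ l) := by
  unfold pvB_mkIdx
  rw [PySem.Dict.contains_eq_isSome_get?, pv_idxfold_get? l 0 _ x hnd]
  by_cases hx : x ∈ l
  · cases h : PySem.List.index? l x with
    | none => rw [PySem.List.index?_eq_none_iff] at h; exact absurd hx h
    | some k => simp [hx]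
  · rw [(PySem.List.index?_eq_none_iff _ _).mpr hx]
    simp [hx, PySem.Dict.get?_empty]

theorem pvRank_cons (a : Int) (t : List Int) (x : Int) :
    pvRank (a :: t) x = (if a < x then 1 else 0) + pvRank t x := by
  unfold pvRank
  by_cases h : a < x
  · rw [List.filter_cons_of_pos (by simp [h])]; simp [h, Nat.add_comm]
  · rw [List.filter_cons_of_neg (by simp [h])]; simp [h]

theorem pv_rank_mono (l : List Int) (x y : Int) (h : x ≤ y) : pvRank l x ≤ pvRank l y := by
  induction l with
  | nil => exact le_refl _
  | cons a t ih =>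
    rw [pvRank_cons, pvRank_cons]
    have : (if a < x then (1:Nat) else 0) ≤ (if a < y then 1 else 0) := by
      split_ifs with h1 h2 <;> omega
    omega

theorem pv_rank_strict (l : List Int) (u v : Int) (hu : u ∈ l) (huv : u < v) :
    pvRank l u < pvRank l v := by
  induction l with
  | nil => cases hu
  | cons a t ih =>
    rw [pvRank_cons, pvRank_cons]
    rcases List.mem_cons.mp hu with hua | hut
    · subst hua
      have := pv_rank_mono t u v (le_of_lt huv)
      rw [if_neg (lt_irrefl u), if_pos huv]
      omega
    · have hmono : (if a < u then (1:Nat) else 0) ≤ (if a < v then 1 else 0) := by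
        split_ifs <;> omega
      have := ih hut
      omega

theorem pv_rank_le_iff (l : List Int) (u v : Int) (_hu : u ∈ l) (hv : v ∈ l) :
    pvRank l u ≤ pvRank l v ↔ u ≤ v := by
  constructor
  · intro h
    by_contra hlt
    exact absurd (pv_rank_strict l v u hv (by omega)) (by omega)
  · exact pv_rank_mono l u v

theorem pv_rank_lt_length (l : List Int) (x : Int) (hx : x ∈ l) : pvRank l x < l.length := by
  unfold pvRank
  exact List.length_filter_lt_length_iff_exists.mpr ⟨x, hx, by simp⟩

-- pointwise-additive sums of indicators
theorem pv_sum_split {α : Type} (l : List α) (f g h : α → Int)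
    (hpt : ∀ a ∈ l, f a + g a = h a) :
    (l.map f).sum + (l.map g).sum = (l.map h).sum := by
  rw [← PySem.List.sum_map_add_int l f g]
  exact congrArg _ (List.map_congr_left hpt)

-- number of green cells with x-rank < i and y-rank < j (the value B's grid stores)
def pvIC (xs ys : List Int) (green : List (Int × Int)) (i j : Int) : Int :=
  (green.map (fun g =>
    if ((pvRank xs g.1 : Nat) : Int) < i ∧ ((pvRank ys g.2 : Nat) : Int) < j then (1 : Int) else 0)).sum

-- number of green cells at rank pair exactly (i, j) (the value cnt stores)
def pvCell (xs ys : List Int) (green : List (Int × Int)) (i j : Int) : Int :=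
  (green.map (fun g =>
    if ((pvRank xs g.1 : Nat) : Int) = i ∧ ((pvRank ys g.2 : Nat) : Int) = j then (1 : Int) else 0)).sum

-- number of green cells with x-rank = i and y-rank < j (the row accumulator)
def pvRowPref (xs ys : List Int) (green : List (Int × Int)) (i j : Int) : Int :=
  (green.map (fun g =>
    if ((pvRank xs g.1 : Nat) : Int) = i ∧ ((pvRank ys g.2 : Nat) : Int) < j then (1 : Int) else 0)).sum

theorem pvIC_zero_left (xs ys : List Int) (green : List (Int × Int)) (j : Int) :
    pvIC xs ys green 0 j = 0 := by
  unfold pvIC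
  rw [List.map_congr_left (fun g _ => by
    rw [if_neg]; rintro ⟨h1, _⟩; omega)]
  simp

theorem pvIC_zero_right (xs ys : List Int) (green : List (Int × Int)) (i : Int) :
    pvIC xs ys green i 0 = 0 := by
  unfold pvIC
  rw [List.map_congr_left (fun g _ => by
    rw [if_neg]; rintro ⟨_, h2⟩; omega)]
  simp

theorem pvRowPref_zero (xs ys : List Int) (green : List (Int × Int)) (i : Int) :
    pvRowPref xs ys green i 0 = 0 := by
  unfold pvRowPref
  rw [List.map_congr_left (fun g _ => by
    rw [if_neg]; rintro ⟨_, h2⟩; omega)]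
  simp

theorem pvRowPref_succ (xs ys : List Int) (green : List (Int × Int)) (i j : Int) :
    pvRowPref xs ys green i j + pvCell xs ys green i j = pvRowPref xs ys green i (j + 1) :=
  pv_sum_split green _ _ _ (fun g _ => by split_ifs <;> omega)

theorem pvIC_succ_left (xs ys : List Int) (green : List (Int × Int)) (i j : Int) :
    pvIC xs ys green i j + pvRowPref xs ys green i j = pvIC xs ys green (i + 1) j :=
  pv_sum_split green _ _ _ (fun g _ => by split_ifs <;> omega)

-- B's cnt dict holds exactly pvCell
theorem pv_cnt_getD (xs ys : List Int) (hpx : xs.Pairwise (· < ·)) (hpy : ys.Pairwise (· < ·))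
    (green : List (Int × Int)) (hg : ∀ g ∈ green, g.1 ∈ xs ∧ g.2 ∈ ys) (i j : Int) :
    (pvB_cnt green (pvB_mkIdx xs) (pvB_mkIdx ys)).getD (i, j) 0 = pvCell xs ys green i j := by
  have hfold : pvB_cnt green (pvB_mkIdx xs) (pvB_mkIdx ys)
      = ((green.map (fun g => ((pvB_mkIdx xs).getD g.1 0, (pvB_mkIdx ys).getD g.2 0))).foldl
          (fun d x => d.insert x (d.getD x 0 + 1)) PySem.Dict.empty) := by
    unfold pvB_cnt
    rw [List.foldl_map]
  rw [hfold, PySem.Dict.getD_foldl_insert_add_one, PySem.Dict.getD_empty,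
    List.count_eq_countP, List.countP_map]
  have hcgr : List.countP ((fun x => x == (i, j)) ∘
        (fun g => ((pvB_mkIdx xs).getD g.1 0, (pvB_mkIdx ys).getD g.2 0))) green
      = List.countP (fun g =>
          decide (((pvRank xs g.1 : Nat) : Int) = i ∧ ((pvRank ys g.2 : Nat) : Int) = j)) green := by
    refine List.countP_congr (fun g hgm => ?_)
    rcases hg g hgm with ⟨h1, h2⟩
    simp [Function.comp, pvB_mkIdx_getD xs hpx g.1 h1, pvB_mkIdx_getD ys hpy g.2 h2,
      Prod.ext_iff]
  rw [hcgr, ← PySem.List.sum_map_ite_one_zero]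
  unfold pvCell
  simp

-- the row fold builds the next row of prefix sums
theorem pv_row_fold (xs ys : List Int) (green : List (Int × Int))
    (cnt : PySem.Dict (Int × Int) Int)
    (hcnt : ∀ i j : Int, cnt.getD (i, j) 0 = pvCell xs ys green i j)
    (i : Int) (prev : List Int) (ny : Nat)
    (hprev : prev = (List.range (ny + 1)).map (fun (j : Nat) => pvIC xs ys green i (j : Int)))
    (n : Nat) (hn : n ≤ ny) :
    (PySem.List.pyRange 0 (n : Int) 1).foldl
      (fun s j => (s.1 ++ [PySem.List.pyGetD prev (j + 1) 0 + (s.2 + cnt.getD (i, j) 0)],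
                   s.2 + cnt.getD (i, j) 0)) ([(0 : Int)], (0 : Int))
      = ((List.range (n + 1)).map (fun (j : Nat) => pvIC xs ys green (i + 1) (j : Int)),
         pvRowPref xs ys green i (n : Int)) := by
  induction n with
  | zero =>
    rw [Nat.cast_zero, PySem.List.pyRange_one_eq_nil (le_refl 0)]
    simp [pvIC_zero_right, pvRowPref_zero]
  | succ n ih =>
    have hcast : ((n + 1 : Nat) : Int) = (n : Int) + 1 := by push_cast; ring
    rw [hcast, PySem.List.pyRange_one_succ_right (by positivity), List.foldl_append,
      ih (by omega)]
    simp only [List.foldl_cons, List.foldl_nil]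
    have hgetd : PySem.List.pyGetD prev ((n : Int) + 1) 0 = pvIC xs ys green i ((n : Int) + 1) := by
      rw [hprev, ← hcast, PySem.List.pyGetD_natCast,
        PySem.List.getD_map_range _ _ _ _ (by omega), hcast]
    rw [hgetd, hcnt, pvRowPref_succ]
    refine Prod.ext ?_ rfl
    simp only
    rw [pvIC_succ_left, ← hcast]
    conv_rhs => rw [List.range_succ, List.map_append]
    rfl

-- B's grid holds exactly the 2D prefix sums pvIC
theorem pv_grid_spec (xs ys : List Int) (green : List (Int × Int))
    (cnt : PySem.Dict (Int × Int) Int)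
    (hcnt : ∀ i j : Int, cnt.getD (i, j) 0 = pvCell xs ys green i j)
    (nx ny : Nat) :
    pvB_grid cnt nx ny
      = (List.range (nx + 1)).map (fun (i : Nat) =>
          (List.range (ny + 1)).map (fun (j : Nat) => pvIC xs ys green (i : Int) (j : Int))) := by
  have hrow0 : List.replicate (ny + 1) (0 : Int)
      = (List.range (ny + 1)).map (fun (j : Nat) => pvIC xs ys green ((0 : Nat) : Int) (j : Int)) := by
    rw [List.map_congr_left (fun j _ => by
      rw [show ((0 : Nat) : Int) = (0 : Int) from rfl, pvIC_zero_left])]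
    rw [List.map_const', List.length_range]
  unfold pvB_grid
  induction nx with
  | zero =>
    rw [Nat.cast_zero, PySem.List.pyRange_one_eq_nil (le_refl 0)]
    simpa using hrow0
  | succ n ih =>
    have hcast : ((n + 1 : Nat) : Int) = (n : Int) + 1 := by push_cast; ring
    rw [hcast, PySem.List.pyRange_one_succ_right (by positivity), List.foldl_append, ih]
    simp only [List.foldl_cons, List.foldl_nil]
    have hPn : PySem.List.pyGetD ((List.range (n + 1)).map (fun (i : Nat) =>
          (List.range (ny + 1)).map (fun (j : Nat) => pvIC xs ys green (i : Int) (j : Int)))) (n : Int) []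
        = (List.range (ny + 1)).map (fun (j : Nat) => pvIC xs ys green (n : Int) (j : Int)) := by
      rw [PySem.List.pyGetD_natCast, PySem.List.getD_map_range _ _ _ _ (by omega)]
    rw [hPn]
    have hrow : pvB_row cnt (n : Int)
        ((List.range (ny + 1)).map (fun (j : Nat) => pvIC xs ys green (n : Int) (j : Int))) ny
        = (List.range (ny + 1)).map (fun (j : Nat) => pvIC xs ys green ((n : Int) + 1) (j : Int)) := by
      unfold pvB_row
      rw [pv_row_fold xs ys green cnt hcnt (n : Int) _ ny rfl ny (le_refl ny)]
    rw [hrow, ← hcast]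
    conv_rhs => rw [show List.range (n + 1 + 1) = List.range (n + 1) ++ [n + 1] from
      List.range_succ, List.map_append]
    rfl

-- reading the grid at in-range indices
theorem pv_get2_spec (xs ys : List Int) (green : List (Int × Int))
    (cnt : PySem.Dict (Int × Int) Int)
    (hcnt : ∀ i j : Int, cnt.getD (i, j) 0 = pvCell xs ys green i j)
    (nx ny : Nat) (i j : Nat) (hi : i ≤ nx) (hj : j ≤ ny) :
    pvGet2 (pvB_grid cnt nx ny) (i : Int) (j : Int) = pvIC xs ys green (i : Int) (j : Int) := by
  unfold pvGet2
  rw [pv_grid_spec xs ys green cnt hcnt nx ny]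
  have h1 : PySem.List.pyGetD ((List.range (nx + 1)).map (fun (i : Nat) =>
        (List.range (ny + 1)).map (fun (j : Nat) => pvIC xs ys green (i : Int) (j : Int)))) (i : Int) []
      = (List.range (ny + 1)).map (fun (j : Nat) => pvIC xs ys green (i : Int) (j : Int)) := by
    rw [PySem.List.pyGetD_natCast, PySem.List.getD_map_range _ _ _ _ (by omega)]
  rw [h1, PySem.List.pyGetD_natCast, PySem.List.getD_map_range _ _ _ _ (by omega)]

-- four prefix-sum lookups count the cells of a rank rectangle (inclusion–exclusion)
theorem pv_incl_excl (xs ys : List Int) (green : List (Int × Int)) (a b c d : Int)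
    (hab : a ≤ b) (hcd : c ≤ d) :
    (green.map (fun g =>
        if a ≤ ((pvRank xs g.1 : Nat) : Int) ∧ ((pvRank xs g.1 : Nat) : Int) < b ∧
           c ≤ ((pvRank ys g.2 : Nat) : Int) ∧ ((pvRank ys g.2 : Nat) : Int) < d
        then (1 : Int) else 0)).sum
      = pvIC xs ys green b d - pvIC xs ys green a d - pvIC xs ys green b c
        + pvIC xs ys green a c := by
  have e1 := pv_sum_split green
    (fun g => if a ≤ ((pvRank xs g.1 : Nat) : Int) ∧ ((pvRank xs g.1 : Nat) : Int) < b ∧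
           c ≤ ((pvRank ys g.2 : Nat) : Int) ∧ ((pvRank ys g.2 : Nat) : Int) < d
        then (1 : Int) else 0)
    (fun g => (if ((pvRank xs g.1 : Nat) : Int) < a ∧ ((pvRank ys g.2 : Nat) : Int) < d
        then (1 : Int) else 0)
      + (if ((pvRank xs g.1 : Nat) : Int) < b ∧ ((pvRank ys g.2 : Nat) : Int) < c
        then (1 : Int) else 0))
    (fun g => (if ((pvRank xs g.1 : Nat) : Int) < b ∧ ((pvRank ys g.2 : Nat) : Int) < d
        then (1 : Int) else 0)
      + (if ((pvRank xs g.1 : Nat) : Int) < a ∧ ((pvRank ys g.2 : Nat) : Int) < c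
        then (1 : Int) else 0))
    (fun g _ => by dsimp only; split_ifs <;> omega)
  rw [PySem.List.sum_map_add_int, PySem.List.sum_map_add_int] at e1
  unfold pvIC
  omega

-- a rectangle holds as many distinct green cells as its area iff it is fully green
theorem pv_count_area_iff (green : List (Int × Int)) (hnd : green.Nodup)
    (xa xb ya yb : Int) (hx : xa ≤ xb) (hy : ya ≤ yb) :
    (((green.countP (fun g => decide (xa ≤ g.1 ∧ g.1 ≤ xb ∧ ya ≤ g.2 ∧ g.2 ≤ yb)) : Nat) : Int)
        = (xb - xa + 1) * (yb - ya + 1))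
      ↔ (∀ x y, xa ≤ x → x ≤ xb → ya ≤ y → y ≤ yb → (x, y) ∈ green) := by
  set p : (Int × Int) → Bool :=
    fun g => decide (xa ≤ g.1 ∧ g.1 ≤ xb ∧ ya ≤ g.2 ∧ g.2 ≤ yb) with hp
  set T : Finset (Int × Int) := green.toFinset.filter (fun g => p g = true) with hT
  set R : Finset (Int × Int) := (Finset.Icc xa xb) ×ˢ (Finset.Icc ya yb) with hR
  have hfin : green.countP p = T.card := by
    rw [hT, List.countP_eq_length_filter, ← List.toFinset_card_of_nodup (hnd.filter p),
      List.toFinset_filter]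
  have hsub : T ⊆ R := by
    intro g hg
    rcases Finset.mem_filter.mp hg with ⟨_, hgp⟩
    rw [hp] at hgp
    simp only [decide_eq_true_eq] at hgp
    rw [hR]
    rw [Finset.mem_product, Finset.mem_Icc, Finset.mem_Icc]
    exact ⟨⟨hgp.1, hgp.2.1⟩, ⟨hgp.2.2.1, hgp.2.2.2⟩⟩
  have hcardR : ((R.card : Nat) : Int) = (xb - xa + 1) * (yb - ya + 1) := by
    rw [hR, Finset.card_product, Int.card_Icc, Int.card_Icc]
    push_cast
    rw [Int.toNat_of_nonneg (by omega), Int.toNat_of_nonneg (by omega)]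
    ring
  constructor
  · intro h x y h1 h2 h3 h4
    have hcard : R.card ≤ T.card := by omega
    have heq : T = R := Finset.eq_of_subset_of_card_le hsub hcard
    have hxyR : (x, y) ∈ R := by
      rw [hR, Finset.mem_product, Finset.mem_Icc, Finset.mem_Icc]
      exact ⟨⟨h1, h2⟩, ⟨h3, h4⟩⟩
    rw [← heq] at hxyR
    exact List.mem_toFinset.mp (Finset.mem_filter.mp hxyR).1
  · intro h
    have hsup : R ⊆ T := by
      intro g hgR
      rw [hR, Finset.mem_product, Finset.mem_Icc, Finset.mem_Icc] at hgR
      refine Finset.mem_filter.mpr ⟨List.mem_toFinset.mpr ?_, ?_⟩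
      · have := h g.1 g.2 hgR.1.1 hgR.1.2 hgR.2.1 hgR.2.2
        exact this
      · rw [hp]
        simp only [decide_eq_true_eq]
        exact ⟨hgR.1.1, hgR.1.2, hgR.2.1, hgR.2.2⟩
    rw [hfin, Finset.Subset.antisymm hsub hsup]
    exact hcardR

-- A's scan step and B's prefix-sum step agree
theorem pv_step_eq (all_green green : List (Int × Int)) (xs ys : List Int)
    (cnt : PySem.Dict (Int × Int) Int)
    (hmem : ∀ e : Int × Int, e ∈ green ↔ e ∈ all_green)
    (hnd : green.Nodup)
    (hpx : xs.Pairwise (· < ·)) (hpy : ys.Pairwise (· < ·))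
    (hxmem : ∀ x : Int, x ∈ xs ↔ ∃ g ∈ green, g.1 = x)
    (hymem : ∀ y : Int, y ∈ ys ↔ ∃ g ∈ green, g.2 = y)
    (hcnt : ∀ i j : Int, cnt.getD (i, j) 0 = pvCell xs ys green i j)
    (p q : Int × Int) (m : Int) :
    pvA_step all_green p q m
      = pvB_step (pvB_mkIdx xs) (pvB_mkIdx ys) (pvB_grid cnt xs.length ys.length) p q m := by
  simp only [pvA_step, pvB_step]
  by_cases h01 : p.1 = q.1
  · simp [h01]
  by_cases h02 : p.2 = q.2
  · simp [h02]
  have hc : (p.1 == q.1 || p.2 == q.2) = false := by simp [h01, h02]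
  simp only [hc, Bool.false_eq_true, if_false]
  have harea : (max p.1 q.1 - min p.1 q.1 + 1) * (max p.2 q.2 - min p.2 q.2 + 1)
      = (|p.1 - q.1| + 1) * (|p.2 - q.2| + 1) := by
    have h1 : max p.1 q.1 - min p.1 q.1 = |p.1 - q.1| := by
      rcases le_total p.1 q.1 with h | h
      · rw [abs_of_nonpos (by omega)]; omega
      · rw [abs_of_nonneg (by omega)]; omega
    have h2 : max p.2 q.2 - min p.2 q.2 = |p.2 - q.2| := by
      rcases le_total p.2 q.2 with h | h
      · rw [abs_of_nonpos (by omega)]; omega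
      · rw [abs_of_nonneg (by omega)]; omega
    rw [h1, h2]
  rw [harea]
  by_cases hm : (|p.1 - q.1| + 1) * (|p.2 - q.2| + 1) ≤ m
  · rw [if_pos hm, if_pos hm]
  rw [if_neg hm, if_neg hm]
  have hconx := pvB_mkIdx_contains xs hpx.nodup
  have hcony := pvB_mkIdx_contains ys hpy.nodup
  by_cases hall : p.1 ∈ xs ∧ q.1 ∈ xs ∧ p.2 ∈ ys ∧ q.2 ∈ ys
  · obtain ⟨hp1, hq1, hp2, hq2⟩ := hall
    have hor : (!(pvB_mkIdx xs).contains p.1 || !(pvB_mkIdx xs).contains q.1 ||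
        !(pvB_mkIdx ys).contains p.2 || !(pvB_mkIdx ys).contains q.2) = false := by
      rw [hconx, hconx, hcony, hcony]
      simp [hp1, hq1, hp2, hq2]
    rw [hor]
    simp only [Bool.false_eq_true, if_false]
    have hminx : min p.1 q.1 ∈ xs := by rcases le_total p.1 q.1 with h | h <;> simp [h, hp1, hq1]
    have hmaxx : max p.1 q.1 ∈ xs := by rcases le_total p.1 q.1 with h | h <;> simp [h, hp1, hq1]
    have hminy : min p.2 q.2 ∈ ys := by rcases le_total p.2 q.2 with h | h <;> simp [h, hp2, hq2]
    have hmaxy : max p.2 q.2 ∈ ys := by rcases le_total p.2 q.2 with h | h <;> simp [h, hp2, hq2]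
    rw [pvB_mkIdx_getD xs hpx _ hminx, pvB_mkIdx_getD xs hpx _ hmaxx,
      pvB_mkIdx_getD ys hpy _ hminy, pvB_mkIdx_getD ys hpy _ hmaxy]
    have hble : pvRank xs (max p.1 q.1) + 1 ≤ xs.length := pv_rank_lt_length xs _ hmaxx
    have hale : pvRank xs (min p.1 q.1) ≤ xs.length := le_of_lt (pv_rank_lt_length xs _ hminx)
    have hdle : pvRank ys (max p.2 q.2) + 1 ≤ ys.length := pv_rank_lt_length ys _ hmaxy
    have hcle : pvRank ys (min p.2 q.2) ≤ ys.length := le_of_lt (pv_rank_lt_length ys _ hminy)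
    have hbcast : ((pvRank xs (max p.1 q.1) : Nat) : Int) + 1
        = ((pvRank xs (max p.1 q.1) + 1 : Nat) : Int) := by push_cast; ring
    have hdcast : ((pvRank ys (max p.2 q.2) : Nat) : Int) + 1
        = ((pvRank ys (max p.2 q.2) + 1 : Nat) : Int) := by push_cast; ring
    set P := pvB_grid cnt xs.length ys.length with hP
    have hg1 : pvGet2 P ((pvRank xs (max p.1 q.1) : Nat) + 1) ((pvRank ys (max p.2 q.2) : Nat) + 1)
        = pvIC xs ys green ((pvRank xs (max p.1 q.1) : Nat) + 1) ((pvRank ys (max p.2 q.2) : Nat) + 1) := by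
      rw [hbcast, hdcast, hP]
      exact pv_get2_spec xs ys green cnt hcnt _ _ _ _ hble hdle
    have hg2 : pvGet2 P ((pvRank xs (min p.1 q.1) : Nat)) ((pvRank ys (max p.2 q.2) : Nat) + 1)
        = pvIC xs ys green ((pvRank xs (min p.1 q.1) : Nat)) ((pvRank ys (max p.2 q.2) : Nat) + 1) := by
      rw [hdcast, hP]
      exact pv_get2_spec xs ys green cnt hcnt _ _ _ _ hale hdle
    have hg3 : pvGet2 P ((pvRank xs (max p.1 q.1) : Nat) + 1) ((pvRank ys (min p.2 q.2) : Nat))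
        = pvIC xs ys green ((pvRank xs (max p.1 q.1) : Nat) + 1) ((pvRank ys (min p.2 q.2) : Nat)) := by
      rw [hbcast, hP]
      exact pv_get2_spec xs ys green cnt hcnt _ _ _ _ hble hcle
    have hg4 : pvGet2 P ((pvRank xs (min p.1 q.1) : Nat)) ((pvRank ys (min p.2 q.2) : Nat))
        = pvIC xs ys green ((pvRank xs (min p.1 q.1) : Nat)) ((pvRank ys (min p.2 q.2) : Nat)) := by
      rw [hP]
      exact pv_get2_spec xs ys green cnt hcnt _ _ _ _ hale hcle
    have hie := pv_incl_excl xs ys green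
      ((pvRank xs (min p.1 q.1) : Nat)) (((pvRank xs (max p.1 q.1) : Nat)) + 1)
      ((pvRank ys (min p.2 q.2) : Nat)) (((pvRank ys (max p.2 q.2) : Nat)) + 1)
      (by have := pv_rank_mono xs _ _ (min_le_max (a := p.1) (b := q.1)); omega)
      (by have := pv_rank_mono ys _ _ (min_le_max (a := p.2) (b := q.2)); omega)
    have hrect : (green.map (fun g =>
        if (pvRank xs (min p.1 q.1) : Int) ≤ ((pvRank xs g.1 : Nat) : Int) ∧
           ((pvRank xs g.1 : Nat) : Int) < ((pvRank xs (max p.1 q.1) : Nat) : Int) + 1 ∧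
           ((pvRank ys (min p.2 q.2) : Nat) : Int) ≤ ((pvRank ys g.2 : Nat) : Int) ∧
           ((pvRank ys g.2 : Nat) : Int) < ((pvRank ys (max p.2 q.2) : Nat) : Int) + 1
        then (1 : Int) else 0)).sum
        = ((green.countP (fun g => decide (min p.1 q.1 ≤ g.1 ∧ g.1 ≤ max p.1 q.1 ∧
            min p.2 q.2 ≤ g.2 ∧ g.2 ≤ max p.2 q.2)) : Nat) : Int) := by
      rw [List.map_congr_left (fun g hgm => ?_), PySem.List.sum_map_ite_one_zero
        (fun g => decide (min p.1 q.1 ≤ g.1 ∧ g.1 ≤ max p.1 q.1 ∧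
            min p.2 q.2 ≤ g.2 ∧ g.2 ≤ max p.2 q.2)) green]
      have hg1m : g.1 ∈ xs := (hxmem g.1).mpr ⟨g, hgm, rfl⟩
      have hg2m : g.2 ∈ ys := (hymem g.2).mpr ⟨g, hgm, rfl⟩
      have i1 : pvRank xs (min p.1 q.1) ≤ pvRank xs g.1 ↔ min p.1 q.1 ≤ g.1 :=
        pv_rank_le_iff xs _ _ hminx hg1m
      have i2 : pvRank xs g.1 ≤ pvRank xs (max p.1 q.1) ↔ g.1 ≤ max p.1 q.1 :=
        pv_rank_le_iff xs _ _ hg1m hmaxx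
      have i3 : pvRank ys (min p.2 q.2) ≤ pvRank ys g.2 ↔ min p.2 q.2 ≤ g.2 :=
        pv_rank_le_iff ys _ _ hminy hg2m
      have i4 : pvRank ys g.2 ≤ pvRank ys (max p.2 q.2) ↔ g.2 ≤ max p.2 q.2 :=
        pv_rank_le_iff ys _ _ hg2m hmaxy
      refine if_congr ?_ rfl rfl
      rw [decide_eq_true_eq]
      constructor
      · rintro ⟨a1, a2, a3, a4⟩
        exact ⟨i1.mp (by exact_mod_cast a1), i2.mp (by omega), i3.mp (by exact_mod_cast a3),
          i4.mp (by omega)⟩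
      · rintro ⟨a1, a2, a3, a4⟩
        have b1 := i1.mpr a1
        have b2 := i2.mpr a2
        have b3 := i3.mpr a3
        have b4 := i4.mpr a4
        refine ⟨by exact_mod_cast b1, by omega, by exact_mod_cast b3, by omega⟩
    have hcombo : pvGet2 P (((pvRank xs (max p.1 q.1) : Nat) : Int) + 1) (((pvRank ys (max p.2 q.2) : Nat) : Int) + 1)
          - pvGet2 P ((pvRank xs (min p.1 q.1) : Nat)) (((pvRank ys (max p.2 q.2) : Nat) : Int) + 1)
          - pvGet2 P (((pvRank xs (max p.1 q.1) : Nat) : Int) + 1) ((pvRank ys (min p.2 q.2) : Nat))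
          + pvGet2 P ((pvRank xs (min p.1 q.1) : Nat)) ((pvRank ys (min p.2 q.2) : Nat))
        = ((green.countP (fun g => decide (min p.1 q.1 ≤ g.1 ∧ g.1 ≤ max p.1 q.1 ∧
            min p.2 q.2 ≤ g.2 ∧ g.2 ≤ max p.2 q.2)) : Nat) : Int) := by
      rw [hg1, hg2, hg3, hg4, ← hie]
      exact hrect
    have hvalid : (pvA_perimX all_green (min p.1 q.1) (max p.1 q.1) (min p.2 q.2) (max p.2 q.2) &&
        pvA_perimY all_green (min p.1 q.1) (max p.1 q.1) (min p.2 q.2) (max p.2 q.2) &&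
        pvA_interior all_green (min p.1 q.1) (max p.1 q.1) (min p.2 q.2) (max p.2 q.2)) = true
        ↔ (((green.countP (fun g => decide (min p.1 q.1 ≤ g.1 ∧ g.1 ≤ max p.1 q.1 ∧
            min p.2 q.2 ≤ g.2 ∧ g.2 ≤ max p.2 q.2)) : Nat) : Int)
          = (max p.1 q.1 - min p.1 q.1 + 1) * (max p.2 q.2 - min p.2 q.2 + 1)) := by
      rw [pv_valid_iff all_green p.1 p.2 q.1 q.2 h01 h02,
        pv_count_area_iff green hnd _ _ _ _ min_le_max min_le_max]
      constructor
      · intro h x y u1 u2 u3 u4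
        exact (hmem (x, y)).mpr (h x y u1 u2 u3 u4)
      · intro h x y u1 u2 u3 u4
        exact (hmem (x, y)).mp (h x y u1 u2 u3 u4)
    have hcond : (pvA_perimX all_green (min p.1 q.1) (max p.1 q.1) (min p.2 q.2) (max p.2 q.2) &&
        pvA_perimY all_green (min p.1 q.1) (max p.1 q.1) (min p.2 q.2) (max p.2 q.2) &&
        pvA_interior all_green (min p.1 q.1) (max p.1 q.1) (min p.2 q.2) (max p.2 q.2))
        = (pvGet2 P (((pvRank xs (max p.1 q.1) : Nat) : Int) + 1) (((pvRank ys (max p.2 q.2) : Nat) : Int) + 1)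
          - pvGet2 P ((pvRank xs (min p.1 q.1) : Nat)) (((pvRank ys (max p.2 q.2) : Nat) : Int) + 1)
          - pvGet2 P (((pvRank xs (max p.1 q.1) : Nat) : Int) + 1) ((pvRank ys (min p.2 q.2) : Nat))
          + pvGet2 P ((pvRank xs (min p.1 q.1) : Nat)) ((pvRank ys (min p.2 q.2) : Nat))
          == (|p.1 - q.1| + 1) * (|p.2 - q.2| + 1)) := by
      rw [Bool.eq_iff_iff, beq_iff_eq, hvalid, hcombo, harea]
    rw [hcond]
  · have hor : (!(pvB_mkIdx xs).contains p.1 || !(pvB_mkIdx xs).contains q.1 ||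
        !(pvB_mkIdx ys).contains p.2 || !(pvB_mkIdx ys).contains q.2) = true := by
      rw [hconx, hconx, hcony, hcony]
      simp only [Bool.or_eq_true, Bool.not_eq_true', decide_eq_false_iff_not]
      tauto
    rw [hor]
    simp only [if_true]
    cases hval : (pvA_perimX all_green (min p.1 q.1) (max p.1 q.1) (min p.2 q.2) (max p.2 q.2) &&
        pvA_perimY all_green (min p.1 q.1) (max p.1 q.1) (min p.2 q.2) (max p.2 q.2) &&
        pvA_interior all_green (min p.1 q.1) (max p.1 q.1) (min p.2 q.2) (max p.2 q.2)) with
    | false => simp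
    | true =>
      exfalso
      have hv := (pv_valid_iff all_green p.1 p.2 q.1 q.2 h01 h02).mp hval
      have hpmem : (p.1, p.2) ∈ green := (hmem _).mpr
        (hv p.1 p.2 (min_le_left _ _) (le_max_left _ _) (min_le_left _ _) (le_max_left _ _))
      have hqmem : (q.1, q.2) ∈ green := (hmem _).mpr
        (hv q.1 q.2 (min_le_right _ _) (le_max_right _ _) (min_le_right _ _) (le_max_right _ _))
      exact hall ⟨(hxmem p.1).mpr ⟨(p.1, p.2), hpmem, rfl⟩,
        (hxmem q.1).mpr ⟨(q.1, q.2), hqmem, rfl⟩,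
        (hymem p.2).mpr ⟨(p.1, p.2), hpmem, rfl⟩,
        (hymem q.2).mpr ⟨(q.1, q.2), hqmem, rfl⟩⟩

-- the outer pair loops agree step for step
theorem pv_loop_eq (all_green green : List (Int × Int)) (xs ys : List Int)
    (cnt : PySem.Dict (Int × Int) Int)
    (hmem : ∀ e : Int × Int, e ∈ green ↔ e ∈ all_green)
    (hnd : green.Nodup)
    (hpx : xs.Pairwise (· < ·)) (hpy : ys.Pairwise (· < ·))
    (hxmem : ∀ x : Int, x ∈ xs ↔ ∃ g ∈ green, g.1 = x)
    (hymem : ∀ y : Int, y ∈ ys ↔ ∃ g ∈ green, g.2 = y)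
    (hcnt : ∀ i j : Int, cnt.getD (i, j) 0 = pvCell xs ys green i j)
    (red : List (Int × Int)) (m : Int) :
    pvA_loop all_green red m
      = pvB_loop (pvB_mkIdx xs) (pvB_mkIdx ys) (pvB_grid cnt xs.length ys.length) red m := by
  induction red generalizing m with
  | nil => rfl
  | cons p rest ih =>
    rw [pvA_loop, pvB_loop]
    have hf : (fun (m : Int) (q : Int × Int) => pvA_step all_green p q m)
        = (fun (m : Int) (q : Int × Int) =>
            pvB_step (pvB_mkIdx xs) (pvB_mkIdx ys) (pvB_grid cnt xs.length ys.length) p q m) :=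
      funext fun m => funext fun q =>
        pv_step_eq all_green green xs ys cnt hmem hnd hpx hpy hxmem hymem hcnt p q m
    rw [hf, ih]

-- ===== VERDICT (by name: the statement is the Claim_ definition above) =====
theorem largest_rectangle_area_red_green_set_spec : Claim_equal_largest_rectangle_area_red_green_set := by
  intro red_tiles all_green _
  show largest_rectangle_area_red_green_set red_tiles all_green
      = largest_rectangle_area_red_green_set_alt red_tiles all_green
  simp only [largest_rectangle_area_red_green_set, largest_rectangle_area_red_green_set_alt]
  have hmem : ∀ e : Int × Int, e ∈ PySem.Set.ofList all_green ↔ e ∈ all_green :=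
    fun e => PySem.Set.mem_ofList all_green e
  have hnd : (PySem.Set.ofList all_green).Nodup := PySem.Set.nodup_ofList all_green
  have hpx := PySem.List.sorted_ofList_pairwise_lt ((PySem.Set.ofList all_green).map (·.1))
  have hpy := PySem.List.sorted_ofList_pairwise_lt ((PySem.Set.ofList all_green).map (·.2))
  have hxmem : ∀ x : Int,
      x ∈ PySem.List.sorted (PySem.Set.ofList ((PySem.Set.ofList all_green).map (·.1))) (fun x => x) false
        ↔ ∃ g ∈ PySem.Set.ofList all_green, g.1 = x := fun x => by
    rw [PySem.List.mem_sorted, PySem.Set.mem_ofList, List.mem_map]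
  have hymem : ∀ y : Int,
      y ∈ PySem.List.sorted (PySem.Set.ofList ((PySem.Set.ofList all_green).map (·.2))) (fun x => x) false
        ↔ ∃ g ∈ PySem.Set.ofList all_green, g.2 = y := fun y => by
    rw [PySem.List.mem_sorted, PySem.Set.mem_ofList, List.mem_map]
  have hg : ∀ g ∈ PySem.Set.ofList all_green,
      g.1 ∈ PySem.List.sorted (PySem.Set.ofList ((PySem.Set.ofList all_green).map (·.1))) (fun x => x) false
      ∧ g.2 ∈ PySem.List.sorted (PySem.Set.ofList ((PySem.Set.ofList all_green).map (·.2))) (fun x => x) false :=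
    fun g hgm => ⟨(hxmem _).mpr ⟨g, hgm, rfl⟩, (hymem _).mpr ⟨g, hgm, rfl⟩⟩
  exact pv_loop_eq all_green (PySem.Set.ofList all_green) _ _ _
    hmem hnd hpx hpy hxmem hymem
    (pv_cnt_getD _ _ hpx hpy _ hg) red_tiles 0
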